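-- pv_equiv track=rewrite | github.com/KungfuNaman/green-software-foundation | trainingdata_evaluation.py | get_all_data_to_lst
-- ===== SOURCE A (Python) =====
-- def get_all_data_to_lst(combined_dict):
--   res = []
--   count1 = 0
--   for i,q_lst in combined_dict.items():
--     for j in q_lst:
--       if count1 >= 1000:
--         break
--       res.append(j)
--       count1 += 1
--   return res
-- ===== SOURCE B (Python) =====
-- def get_all_data_to_lst(combined_dict):
--   out = []
--   budget = 1000
--   for q_lst in combined_dict.values():
--     if budget == 0:
--       break
--     chunk = q_lst[:budget]
--     out.extend(chunk)
--     budget -= len(chunk)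
--   return out
-- ===== Notes on version B (the rewrite author's own statement) =====
-- stated objective: alternative
-- what changed: Replaces A's nested element-by-element loop with a global counter by a per-list budget: each dict value contributes one whole slice lst[:budget] via extend, the budget shrinks by the chunk length, and iteration stops once the budget is exhausted.
import Mathlib
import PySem

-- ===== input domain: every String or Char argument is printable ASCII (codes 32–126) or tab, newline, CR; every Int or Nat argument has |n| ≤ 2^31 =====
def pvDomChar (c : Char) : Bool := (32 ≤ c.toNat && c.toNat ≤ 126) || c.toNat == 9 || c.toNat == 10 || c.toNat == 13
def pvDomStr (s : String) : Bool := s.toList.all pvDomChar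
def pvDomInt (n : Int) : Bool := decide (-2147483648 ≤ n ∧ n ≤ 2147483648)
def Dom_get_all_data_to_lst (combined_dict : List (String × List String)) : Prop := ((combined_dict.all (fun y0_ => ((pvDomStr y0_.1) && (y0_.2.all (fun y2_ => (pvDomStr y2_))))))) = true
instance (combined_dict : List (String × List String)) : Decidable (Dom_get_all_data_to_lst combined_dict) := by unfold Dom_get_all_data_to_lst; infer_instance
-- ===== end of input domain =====

-- B replaces A's element-by-element nested loop with a global counter by a
-- per-list budget: each value contributes one slice lst[:budget] (objective: alternative).

-- ===== PORT A =====
-- state = (res, count1); the Python 'break' leaves the state unchanged for the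
-- rest of the inner list, which the fold mirrors by returning the state unchanged.
def get_all_data_to_lst (combined_dict : List (String × List String)) : List String :=
  (combined_dict.foldl
    (fun (s : List String × Nat) iq =>
      iq.2.foldl
        (fun (s : List String × Nat) j =>
          if s.2 ≥ 1000 then s else (s.1 ++ [j], s.2 + 1)) s)
    ([], 0)).1

-- ===== PORT B =====
-- loop over the values with a shrinking budget; the accumulated 'out' is the
-- concatenation of the chunks, so the recursion returns the remaining chunks.
-- q_lst[:budget] with budget ≥ 0 is exactly List.take budget.
def getAllAltGo : List (String × List String) → Nat → List String
  | [], _ => []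
  | p :: t, budget =>
      if budget = 0 then []
      else
        let chunk := p.2.take budget
        chunk ++ getAllAltGo t (budget - chunk.length)

def get_all_data_to_lst_alt (combined_dict : List (String × List String)) : List String :=
  getAllAltGo combined_dict 1000

-- ===== PRECONDITION & SPEC =====
def Spec_get_all_data_to_lst (combined_dict : List (String × List String)) (out : List String) : Prop := out = get_all_data_to_lst_alt combined_dict
instance (combined_dict : List (String × List String)) (out : List String) : Decidable (Spec_get_all_data_to_lst combined_dict out) := by unfold Spec_get_all_data_to_lst; infer_instance

-- ===== CLAIM (what is proved, stated in full; the proofs are below) =====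
def Claim_equal_get_all_data_to_lst : Prop := ∀ (combined_dict : List (String × List String)), Dom_get_all_data_to_lst combined_dict → Spec_get_all_data_to_lst combined_dict (get_all_data_to_lst combined_dict)

-- ===== LEMMAS AND PROOFS =====

theorem take_append_take (n : Nat) (xs ys : List String) :
    (xs.take n ++ ys).take n = (xs ++ ys).take n := by
  rw [List.take_append, List.take_append,
    List.take_take, Nat.min_self, List.length_take]
  congr 2
  omega

theorem inner_fold (lst res : List String) (h : res.length ≤ 1000) :
    lst.foldl
      (fun (s : List String × Nat) j =>
        if s.2 ≥ 1000 then s else (s.1 ++ [j], s.2 + 1)) (res, res.length)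
      = ((res ++ lst).take 1000, ((res ++ lst).take 1000).length) := by
  induction lst generalizing res with
  | nil =>
    simp [List.length_take]
    omega
  | cons a t ih =>
    by_cases hc : res.length ≥ 1000
    · have hres : res.length = 1000 := by omega
      simp only [List.foldl_cons, if_pos hc]
      have : ∀ u, List.foldl
          (fun (s : List String × Nat) j =>
            if s.2 ≥ 1000 then s else (s.1 ++ [j], s.2 + 1)) (res, res.length) u
          = (res, res.length) := by
        intro u
        induction u with
        | nil => rfl
        | cons b v ihv => simp only [List.foldl_cons, if_pos hc]; exact ihv
      rw [this t]
      have htake : (res ++ a :: t).take 1000 = res := by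
        rw [List.take_append, hres]
        simp [List.take_of_length_le (le_of_eq hres)]
      rw [htake, hres]
    · simp only [List.foldl_cons, if_neg hc]
      have h1 : (res ++ [a]).length = res.length + 1 := by simp
      have h2 : (res ++ [a]).length ≤ 1000 := by simp; omega
      have := ih (res ++ [a]) h2
      rw [← h1, this]
      simp [List.append_assoc]

theorem outer_fold (d : List (String × List String)) (res : List String)
    (h : res.length ≤ 1000) (hres : res = res.take 1000) :
    (d.foldl
      (fun (s : List String × Nat) iq =>
        iq.2.foldl
          (fun (s : List String × Nat) j =>
            if s.2 ≥ 1000 then s else (s.1 ++ [j], s.2 + 1)) s)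
      (res, res.length)).1
      = (res ++ d.flatMap Prod.snd).take 1000 := by
  induction d generalizing res with
  | nil =>
    simp only [List.foldl_nil, List.flatMap_nil, List.append_nil]
    exact hres
  | cons p t ih =>
    simp only [List.foldl_cons]
    rw [inner_fold p.2 res h]
    have hlen : ((res ++ p.2).take 1000).length ≤ 1000 := by
      simp [List.length_take]
    have htk : (res ++ p.2).take 1000 = ((res ++ p.2).take 1000).take 1000 := by
      rw [List.take_take, Nat.min_self]
    rw [ih _ hlen htk]
    rw [take_append_take, List.flatMap_cons, List.append_assoc]

theorem altGo_eq (d : List (String × List String)) (b : Nat) :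
    getAllAltGo d b = (d.flatMap Prod.snd).take b := by
  induction d generalizing b with
  | nil => simp [getAllAltGo]
  | cons p t ih =>
    by_cases hb : b = 0
    · simp [getAllAltGo, hb]
    · simp only [getAllAltGo, if_neg hb, List.flatMap_cons, List.take_append]
      rw [ih]
      congr 1
      simp [List.length_take]
      omega

-- ===== VERDICT (by name: the statement is the Claim_ definition above) =====
theorem get_all_data_to_lst_spec : Claim_equal_get_all_data_to_lst := by
  intro d _
  unfold Spec_get_all_data_to_lst get_all_data_to_lst get_all_data_to_lst_alt
  rw [show ((([] : List String), (0 : Nat)) = (([] : List String), ([] : List String).length)) from rfl]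
  rw [outer_fold d [] (by simp) (by simp), altGo_eq]
  simp
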